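-- pv_equiv track=rewrite | github.com/mdrahmed/interviewPrep | Leetcode-contests/practice.py | maxsqarea
-- ===== SOURCE A (Python) =====
-- def maxsqarea(m,n,h,v):
--     M = 10 ** 9 + 7
--     def getSides(fences, L):
--         sides = set()
--         fences.append(1)
--         fences.append(L)
--
--         fences.sort()
--         N = len(fences)
--         for i in range(N):
--             for j in range(i+1, N):
--                 sides.add(fences[j] - fences[i])
--
--         return sides
--
--     h = getSides(h, m)
--     v = getSides(v, n)
--
--     o = h & v
--
--     if len(o) == 0:
--         return -1
--
--     return (max(o) ** 2) % M
-- ===== SOURCE B (Python) =====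
-- def maxsqarea(m, n, h, v):
--     # Return-value equivalent to A; performs the same in-place append+sort mutation of h and v.
--     # Different algorithm: never builds v's pairwise-difference set. It keeps only the set of
--     # v FENCE POSITIONS and decides "d is a v gap" by translation membership (x and x+d both
--     # fences), with a duplicate flag for d == 0; candidates are the h gaps, scanned with a
--     # running max.
--     M = 10 ** 9 + 7
--     h.append(1); h.append(m); h.sort()
--     v.append(1); v.append(n); v.sort()
--     vset = set(v)
--     v_dup = len(vset) != len(v)
--
--     def is_vgap(d):
--         if d == 0:
--             return v_dup
--         return any(x + d in vset for x in vset)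
--
--     best = -1
--     for i, a in enumerate(h):
--         for b in h[i + 1:]:
--             d = b - a
--             if d > best and is_vgap(d):
--                 best = d
--     return -1 if best == -1 else best * best % M
-- ===== Notes on version B (the rewrite author's own statement) =====
-- stated objective: faster
-- what changed: B never materialises v's O(V^2) pairwise-difference set or any intersection: it keeps only the set of v fence POSITIONS and tests a candidate h gap d by translation membership (some fence x with x+d also a fence, duplicate flag for d=0), scanning the h gaps once with a running max.
import Mathlib
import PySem

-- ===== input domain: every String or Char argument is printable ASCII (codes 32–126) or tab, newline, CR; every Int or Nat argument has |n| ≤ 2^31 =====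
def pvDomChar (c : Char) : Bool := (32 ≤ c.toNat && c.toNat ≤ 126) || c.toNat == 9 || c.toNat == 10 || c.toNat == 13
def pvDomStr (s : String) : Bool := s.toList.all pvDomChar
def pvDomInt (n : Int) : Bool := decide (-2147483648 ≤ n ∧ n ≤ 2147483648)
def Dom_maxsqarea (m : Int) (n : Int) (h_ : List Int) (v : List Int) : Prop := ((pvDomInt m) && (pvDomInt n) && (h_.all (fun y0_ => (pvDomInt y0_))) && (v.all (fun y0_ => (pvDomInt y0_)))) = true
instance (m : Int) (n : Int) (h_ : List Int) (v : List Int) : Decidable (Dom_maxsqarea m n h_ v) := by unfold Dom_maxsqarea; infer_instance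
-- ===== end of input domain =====

-- B never builds v's pairwise-difference set or an intersection: it keeps only the set of v
-- FENCE POSITIONS and tests each candidate h gap d by translation membership (x and x+d both
-- fences; a duplicate flag for d = 0), scanning the h gaps with a running max. Return-value
-- equivalence only as regards mutation: both A and B append 1 and the bound to h and v in
-- place and sort them.

-- ===== PORT A =====
-- A's nested helper getSides(fences, L)
def pvGetSides (fences : List Int) (L : Int) : PySem.Set Int :=
  let fences := fences ++ [1]
  let fences := fences ++ [L]
  let fences := PySem.List.sorted fences (fun x => x) false
  let N : Int := PySem.List.len fences
  (PySem.List.pyRange 0 N 1).foldl (fun sides i =>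
    (PySem.List.pyRange (i + 1) N 1).foldl (fun sides j =>
      PySem.Set.add sides (PySem.List.pyGetD fences j 0 - PySem.List.pyGetD fences i 0)) sides)
    PySem.Set.empty

def maxsqarea (m : Int) (n : Int) (h_ : List Int) (v : List Int) : Int :=
  let M : Int := 10 ^ 9 + 7
  let h2 := pvGetSides h_ m
  let v2 := pvGetSides v n
  let o := PySem.Set.inter h2 v2
  if PySem.Set.len o = 0 then -1
  else
    match PySem.List.max? o (fun x => x) with
    | some x => PySem.Int.mod (x ^ 2) M
    | none => -1

-- ===== PORT B =====
-- Source B's nested helper is_vgap(d) (closing over vset and v_dup)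
def pvIsVgap (vdup : Bool) (vset : PySem.Set Int) (d : Int) : Bool :=
  if d = 0 then vdup
  else vset.any (fun x => PySem.Set.contains vset (x + d))

def maxsqarea_alt (m : Int) (n : Int) (h_ : List Int) (v : List Int) : Int :=
  let M : Int := 10 ^ 9 + 7
  let hf := PySem.List.sorted (h_ ++ [1] ++ [m]) (fun x => x) false
  let vf := PySem.List.sorted (v ++ [1] ++ [n]) (fun x => x) false
  let vset : PySem.Set Int := PySem.Set.ofList vf
  let vdup : Bool := PySem.Set.len vset != PySem.List.len vf
  let best : Int :=
    (PySem.List.enumerate hf 0).foldl (fun best p =>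
      (PySem.List.slice hf (some (p.1 + 1)) none).foldl
        (fun best b => if b - p.2 > best ∧ pvIsVgap vdup vset (b - p.2) = true then b - p.2 else best)
        best) (-1)
  if best = -1 then -1 else PySem.Int.mod (best * best) M

-- ===== PRECONDITION & SPEC =====
def Spec_maxsqarea (m : Int) (n : Int) (h_ : List Int) (v : List Int) (out : Int) : Prop := out = maxsqarea_alt m n h_ v
instance (m : Int) (n : Int) (h_ : List Int) (v : List Int) (out : Int) : Decidable (Spec_maxsqarea m n h_ v out) := by unfold Spec_maxsqarea; infer_instance

-- ===== CLAIM (what is proved, stated in full; the proofs are below) =====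
def Claim_equal_maxsqarea : Prop := ∀ (m : Int) (n : Int) (h_ : List Int) (v : List Int), Dom_maxsqarea m n h_ v → Spec_maxsqarea m n h_ v (maxsqarea m n h_ v)

-- ===== LEMMAS AND PROOFS =====

-- "x is a pairwise difference f[j] - f[i] with i < j" — the common characterisation
def pvP (f : List Int) (x : Int) : Prop :=
  ∃ i j : Nat, i < j ∧ j < f.length ∧ x = f.getD j 0 - f.getD i 0

-- membership in a nested double fold of Set.add
theorem pv_mem_foldl_foldl_add {α β : Type} (l : List α) (g : α → List β) (f : α → β → Int)
    (s : PySem.Set Int) (y : Int) :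
    y ∈ l.foldl (fun s a => (g a).foldl (fun s b => PySem.Set.add s (f a b)) s) s ↔
      y ∈ s ∨ ∃ a ∈ l, ∃ b ∈ g a, y = f a b := by
  induction l generalizing s with
  | nil => simp
  | cons a t ih =>
    simp only [List.foldl_cons, ih, PySem.Set.mem_foldl_add, List.mem_cons]
    constructor
    · rintro ((hs | ⟨b, hb, rfl⟩) | ⟨a', ha', b, hb, rfl⟩)
      · exact Or.inl hs
      · exact Or.inr ⟨a, Or.inl rfl, b, hb, rfl⟩
      · exact Or.inr ⟨a', Or.inr ha', b, hb, rfl⟩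
    · rintro (hs | ⟨a', rfl | ha', b, hb, rfl⟩)
      · exact Or.inl (Or.inl hs)
      · exact Or.inl (Or.inr ⟨b, hb, rfl⟩)
      · exact Or.inr ⟨a', ha', b, hb, rfl⟩

-- A-shape membership: the double range loop of getSides
theorem pv_mem_A (f : List Int) (y : Int) :
    y ∈ (PySem.List.pyRange 0 (PySem.List.len f) 1).foldl (fun sides i =>
          (PySem.List.pyRange (i + 1) (PySem.List.len f) 1).foldl (fun sides j =>
            PySem.Set.add sides (PySem.List.pyGetD f j 0 - PySem.List.pyGetD f i 0)) sides)
          PySem.Set.empty ↔ pvP f y := by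
  rw [pv_mem_foldl_foldl_add (f := fun i j => PySem.List.pyGetD f j 0 - PySem.List.pyGetD f i 0)]
  simp only [PySem.List.mem_pyRange_one, PySem.List.len_eq, pvP]
  constructor
  · rintro (h | ⟨i, ⟨hi0, hiN⟩, j, ⟨hij, hjN⟩, rfl⟩)
    · simp [PySem.Set.empty] at h
    · obtain ⟨i', rfl⟩ : ∃ i' : Nat, i = (i' : Int) := ⟨i.toNat, by omega⟩
      obtain ⟨j', rfl⟩ : ∃ j' : Nat, j = (j' : Int) := ⟨j.toNat, by omega⟩
      refine ⟨i', j', by omega, by omega, ?_⟩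
      simp [PySem.List.pyGetD_natCast, List.getD]
  · rintro ⟨i, j, hij, hj, rfl⟩
    refine Or.inr ⟨(i : Int), ⟨by omega, by omega⟩, (j : Int), ⟨by omega, by omega⟩, ?_⟩
    simp [PySem.List.pyGetD_natCast]

-- B-shape membership: enumerate + tail-slice
theorem pv_mem_B (f : List Int) (y : Int) :
    (∃ p ∈ PySem.List.enumerate f 0, ∃ b ∈ PySem.List.slice f (some (p.1 + 1)) none, y = b - p.2)
      ↔ pvP f y := by
  constructor
  · rintro ⟨p, hp, b, hb, rfl⟩
    rw [PySem.List.mem_enumerate_iff] at hp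
    obtain ⟨k, hk, rfl⟩ := hp
    rw [show ((0 : Int) + (k : Int), f[k]).1 + 1 = ((k + 1 : Nat) : Int) by push_cast; ring,
      PySem.List.slice_from_natCast] at hb
    obtain ⟨j0, hj0, rfl⟩ := List.mem_iff_getElem.mp hb
    have hj0' : k + 1 + j0 < f.length := by
      have := hj0; rw [List.length_drop] at this; omega
    refine ⟨k, k + 1 + j0, by omega, hj0', ?_⟩
    rw [List.getElem_drop, List.getD_eq_getElem f 0 hj0', List.getD_eq_getElem f 0 (by omega)]
  · rintro ⟨i, j, hij, hj, rfl⟩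
    refine ⟨((0 : Int) + (i : Int), f[i]'(by omega)), ?_, f[j]'hj, ?_, ?_⟩
    · rw [PySem.List.mem_enumerate_iff]
      exact ⟨i, by omega, rfl⟩
    · rw [show ((0 : Int) + (i : Int), f[i]'(by omega)).1 + 1 = ((i + 1 : Nat) : Int) by push_cast; ring,
        PySem.List.slice_from_natCast]
      rw [List.mem_iff_getElem]
      refine ⟨j - (i + 1), by rw [List.length_drop]; omega, ?_⟩
      rw [List.getElem_drop]
      congr 1
      omega
    · rw [List.getD_eq_getElem f 0 hj, List.getD_eq_getElem f 0 (by omega)]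

-- all pairwise differences of a sorted list are nonnegative
theorem pv_nonneg (xs : List Int) (y : Int)
    (hy : pvP (PySem.List.sorted xs (fun x => x) false) y) : 0 ≤ y := by
  obtain ⟨i, j, hij, hj, rfl⟩ := hy
  rw [List.getD_eq_getElem _ 0 hj, List.getD_eq_getElem _ 0 (by omega)]
  have := PySem.List.key_sorted_getElem_mono xs (fun x => x) (le_of_lt hij) hj
  simpa using by omega

-- the running-max loop: characterisation of the result
theorem pv_bestFold (L : List Int) (q : Int → Bool) (init : Int) :
    (L.foldl (fun acc d => if d > acc ∧ q d = true then d else acc) init = init ∨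
      (L.foldl (fun acc d => if d > acc ∧ q d = true then d else acc) init ∈ L ∧
        q (L.foldl (fun acc d => if d > acc ∧ q d = true then d else acc) init) = true)) ∧
    init ≤ L.foldl (fun acc d => if d > acc ∧ q d = true then d else acc) init ∧
    ∀ d ∈ L, q d = true → d ≤ L.foldl (fun acc d => if d > acc ∧ q d = true then d else acc) init := by
  induction L generalizing init with
  | nil => simp
  | cons a t ih =>
    simp only [List.foldl_cons, List.mem_cons]
    by_cases hc : a > init ∧ q a = true
    · rw [if_pos hc]
      obtain ⟨h1, h2, h3⟩ := ih a
      refine ⟨?_, by omega, ?_⟩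
      · rcases h1 with h1 | h1
        · exact Or.inr ⟨Or.inl h1, by rw [h1]; exact hc.2⟩
        · exact Or.inr ⟨Or.inr h1.1, h1.2⟩
      · rintro d (rfl | hd) hq
        · omega
        · exact h3 d hd hq
    · rw [if_neg hc]
      obtain ⟨h1, h2, h3⟩ := ih init
      refine ⟨?_, h2, ?_⟩
      · rcases h1 with h1 | h1
        · exact Or.inl h1
        · exact Or.inr ⟨Or.inr h1.1, h1.2⟩
      · rintro d (rfl | hd) hq
        · have hng : ¬ d > init := fun hgt => hc ⟨hgt, hq⟩
          omega
        · exact h3 d hd hq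

-- a nested fold is a fold over the flattened list
theorem pv_foldl_foldl_flat {α β γ : Type} (l : List α) (g : α → List β) (val : α → β → γ)
    (step : γ → γ → γ) (init : γ) :
    l.foldl (fun acc a => (g a).foldl (fun acc b => step acc (val a b)) acc) init =
      (l.flatMap (fun a => (g a).map (val a))).foldl step init := by
  induction l generalizing init with
  | nil => rfl
  | cons a t ih => simp [List.foldl_append, List.foldl_map, ih]

-- B's fused max loop, flattened to a single fold
theorem pv_best_flat (f : List Int) (q : Int → Bool) (init : Int) :
    (PySem.List.enumerate f 0).foldl (fun best p =>
      (PySem.List.slice f (some (p.1 + 1)) none).foldl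
        (fun best b => if b - p.2 > best ∧ q (b - p.2) = true then b - p.2 else best)
        best) init
    = ((PySem.List.enumerate f 0).flatMap (fun p =>
        (PySem.List.slice f (some (p.1 + 1)) none).map (fun b => b - p.2))).foldl
        (fun acc d => if d > acc ∧ q d = true then d else acc) init :=
  pv_foldl_foldl_flat (PySem.List.enumerate f 0)
    (fun p => PySem.List.slice f (some (p.1 + 1)) none)
    (fun (p : Int × Int) (b : Int) => b - p.2)
    (fun acc d => if d > acc ∧ q d = true then d else acc) init

theorem pv_mem_flat (f : List Int) (y : Int) :
    y ∈ (PySem.List.enumerate f 0).flatMap (fun p =>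
          (PySem.List.slice f (some (p.1 + 1)) none).map (fun b => b - p.2)) ↔ pvP f y := by
  rw [← pv_mem_B]
  simp only [List.mem_flatMap, List.mem_map]
  constructor
  · rintro ⟨p, hp, b, hb, rfl⟩
    exact ⟨p, hp, b, hb, rfl⟩
  · rintro ⟨p, hp, b, hb, rfl⟩
    exact ⟨p, hp, b, hb, rfl⟩

-- set(l) has as many elements as l iff l has no duplicates
theorem pv_len_ofList (l : List Int) : (PySem.Set.ofList l).length = l.length ↔ l.Nodup := by
  constructor
  · intro hlen
    have h1 : (PySem.Set.ofList l).toFinset = l.toFinset := by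
      ext x; simp [PySem.Set.mem_ofList]
    have h2 := List.toFinset_card_of_nodup (PySem.Set.nodup_ofList (xs := l))
    have h3 : l.toFinset.card = l.dedup.length := List.card_toFinset l
    have h4 : l.dedup.length = l.length := by rw [← h3, ← h1, h2, hlen]
    have hd : l.dedup = l := List.Sublist.eq_of_length (List.dedup_sublist l) h4
    rw [← hd]; exact List.nodup_dedup l
  · intro h; rw [PySem.Set.ofList_eq_self_of_nodup _ h]

-- 0 is a pairwise difference iff the list has a duplicate
theorem pv_zero (f : List Int) : pvP f 0 ↔ ¬ f.Nodup := by
  rw [List.Nodup, List.pairwise_iff_getElem]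
  constructor
  · rintro ⟨i, j, hij, hj, he⟩
    intro hall
    rw [List.getD_eq_getElem f 0 hj,
      List.getD_eq_getElem f 0 (show i < f.length by omega)] at he
    exact hall i j (by omega) hj hij (by omega)
  · intro hnot
    by_contra hno
    apply hnot
    intro i j hi hj hij he
    exact hno ⟨i, j, hij, hj, by
      rw [List.getD_eq_getElem _ 0 hj, List.getD_eq_getElem _ 0 hi]; omega⟩

-- a positive d is a pairwise difference of a sorted list iff some element shifted by d is also in it
theorem pv_trans (xs : List Int) (d : Int) (hd : 0 < d) :
    pvP (PySem.List.sorted xs (fun x => x) false) d ↔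
      ∃ x ∈ PySem.List.sorted xs (fun x => x) false,
        x + d ∈ PySem.List.sorted xs (fun x => x) false := by
  constructor
  · rintro ⟨i, j, hij, hj, hd'⟩
    refine ⟨(PySem.List.sorted xs (fun x => x) false).getD i 0, ?_, ?_⟩
    · rw [List.getD_eq_getElem _ 0 (by omega)]
      exact List.getElem_mem _
    · have : (PySem.List.sorted xs (fun x => x) false).getD i 0 + d
          = (PySem.List.sorted xs (fun x => x) false).getD j 0 := by omega
      rw [this, List.getD_eq_getElem _ 0 hj]
      exact List.getElem_mem _
  · rintro ⟨x, hx, hxd⟩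
    obtain ⟨i, hi, rfl⟩ := List.mem_iff_getElem.mp hx
    obtain ⟨j, hj, hje⟩ := List.mem_iff_getElem.mp hxd
    have hij : i < j := by
      by_contra hnot
      have hle : j ≤ i := by omega
      have := PySem.List.key_sorted_getElem_mono xs (fun x => x) hle hi
      simp only at this
      omega
    exact ⟨i, j, hij, hj, by
      rw [List.getD_eq_getElem _ 0 hj, List.getD_eq_getElem _ 0 (by omega)]; omega⟩

theorem pv_main (m n : Int) (h_ v : List Int) : maxsqarea m n h_ v = maxsqarea_alt m n h_ v := by
  unfold maxsqarea maxsqarea_alt pvGetSides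
  dsimp only
  rw [pv_best_flat]
  set hf := PySem.List.sorted (h_ ++ [1] ++ [m]) (fun x => x) false with hhf
  set vf := PySem.List.sorted (v ++ [1] ++ [n]) (fun x => x) false with hvf
  set hsA := (PySem.List.pyRange 0 (PySem.List.len hf) 1).foldl (fun sides i =>
      (PySem.List.pyRange (i + 1) (PySem.List.len hf) 1).foldl (fun sides j =>
        PySem.Set.add sides (PySem.List.pyGetD hf j 0 - PySem.List.pyGetD hf i 0)) sides)
      PySem.Set.empty with hhsA
  set vsA := (PySem.List.pyRange 0 (PySem.List.len vf) 1).foldl (fun sides i =>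
      (PySem.List.pyRange (i + 1) (PySem.List.len vf) 1).foldl (fun sides j =>
        PySem.Set.add sides (PySem.List.pyGetD vf j 0 - PySem.List.pyGetD vf i 0)) sides)
      PySem.Set.empty with hvsA
  set vset := PySem.Set.ofList vf with hvset
  set vdup : Bool := PySem.Set.len vset != PySem.List.len vf with hvdup
  set q : Int → Bool := pvIsVgap vdup vset with hq
  set Lh := (PySem.List.enumerate hf 0).flatMap (fun p =>
      (PySem.List.slice hf (some (p.1 + 1)) none).map (fun b => b - p.2)) with hLh
  set o := PySem.Set.inter hsA vsA with ho
  set best := Lh.foldl (fun acc d => if d > acc ∧ q d = true then d else acc) (-1) with hbest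
  have hmemo : ∀ y, y ∈ o ↔ pvP hf y ∧ pvP vf y := by
    intro y
    rw [ho, PySem.Set.mem_inter, hhsA, hvsA, pv_mem_A, pv_mem_A]
  have hLhmem : ∀ y, y ∈ Lh ↔ pvP hf y := by
    intro y; rw [hLh, pv_mem_flat]
  -- the translation/duplicate test decides "d is a v gap" for every candidate h gap d
  have hqiff : ∀ d, 0 ≤ d → (q d = true ↔ pvP vf d) := by
    intro d hd0
    rw [hq]
    unfold pvIsVgap
    by_cases hz : d = 0
    · subst hz
      rw [if_pos rfl, pv_zero]
      constructor
      · intro hv hnd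
        have hlen : (PySem.Set.ofList vf).length = vf.length := (pv_len_ofList vf).mpr hnd
        rw [hvdup, bne_iff_ne] at hv
        apply hv
        simp only [PySem.Set.len, PySem.List.len_eq, hvset, hlen]
      · intro hnd
        rw [hvdup, bne_iff_ne]
        intro he
        apply hnd
        apply (pv_len_ofList vf).mp
        simp only [PySem.Set.len, PySem.List.len_eq, hvset] at he
        omega
    · rw [if_neg hz]
      have hdpos : 0 < d := by omega
      rw [List.any_eq_true]
      constructor
      · rintro ⟨x, hx, hc⟩
        rw [PySem.Set.contains_iff, hvset, PySem.Set.mem_ofList] at hc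
        rw [hvset, PySem.Set.mem_ofList] at hx
        exact (pv_trans (v ++ [1] ++ [n]) d hdpos).mpr ⟨x, hx, hc⟩
      · intro hp
        obtain ⟨x, hx, hxd⟩ := (pv_trans (v ++ [1] ++ [n]) d hdpos).mp hp
        refine ⟨x, ?_, ?_⟩
        · rw [hvset, PySem.Set.mem_ofList]; exact hx
        · rw [PySem.Set.contains_iff, hvset, PySem.Set.mem_ofList]; exact hxd
  obtain ⟨hb1, _, hb3⟩ := pv_bestFold Lh q (-1)
  rw [← hbest] at hb1 hb3
  by_cases hlen : PySem.Set.len o = 0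
  · -- intersection empty: both return -1
    have hnil : o = [] := by
      simp only [PySem.Set.len] at hlen
      exact List.length_eq_zero_iff.mp (by omega)
    have hbestm1 : best = -1 := by
      rcases hb1 with h1 | ⟨h1, h2⟩
      · exact h1
      · exfalso
        have hbh : pvP hf best := (hLhmem best).mp h1
        have hb0 : 0 ≤ best := pv_nonneg _ _ (hhf ▸ hbh)
        have : best ∈ o := (hmemo best).mpr ⟨hbh, (hqiff best hb0).mp h2⟩
        rw [hnil] at this
        exact List.not_mem_nil this
    rw [if_pos hlen, if_pos hbestm1]
  · -- intersection nonempty: both return (max)^2 mod M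
    have hne : o ≠ [] := by
      intro hnil
      apply hlen
      rw [hnil]; rfl
    obtain ⟨x, hx⟩ : ∃ x, PySem.List.max? o (fun x => x) = some x := by
      cases hmx : PySem.List.max? o (fun x => x) with
      | none => exact absurd ((PySem.List.max?_eq_none_iff _ _).mp hmx) hne
      | some x => exact ⟨x, rfl⟩
    have hxo : x ∈ o := PySem.List.max?_mem hx
    have hxmax : ∀ y ∈ o, y ≤ x := by
      intro y hy
      simpa using PySem.List.max?_isMax hx y hy
    obtain ⟨hxh, hxv⟩ := (hmemo x).mp hxo
    have hx0 : 0 ≤ x := pv_nonneg _ _ (hhf ▸ hxh)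
    have hxle : x ≤ best := hb3 x ((hLhmem x).mpr hxh) ((hqiff x hx0).mpr hxv)
    have hbx : best = x := by
      rcases hb1 with h1 | ⟨h1, h2⟩
      · omega
      · have hbh : pvP hf best := (hLhmem best).mp h1
        have hb0 : 0 ≤ best := pv_nonneg _ _ (hhf ▸ hbh)
        have : best ∈ o := (hmemo best).mpr ⟨hbh, (hqiff best hb0).mp h2⟩
        have := hxmax best this
        omega
    rw [if_neg hlen, hx, if_neg (by omega : ¬ best = -1), hbx]
    dsimp only
    rw [pow_two]

-- ===== VERDICT (by name: the statement is the Claim_ definition above) =====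
theorem maxsqarea_spec : Claim_equal_maxsqarea := by
  intro m n h_ v _
  unfold Spec_maxsqarea
  exact pv_main m n h_ v
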